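-- pv_equiv track=rewrite | github.com/joeyshi12/advent-of-code | 2025/day2/soln2.py | is_invalid_id
-- ===== SOURCE A (Python) =====
-- def is_repeated_sequence(product_id: str, num_occurrances: int) -> int:
--     sequence_size = len(product_id) // num_occurrances
--     sequence = product_id[:sequence_size]
--     for i in range(1, num_occurrances):
--         if sequence != product_id[sequence_size * i:sequence_size * (i + 1)]:
--             return False
--     return True
--
-- def is_invalid_id(product_id: int) -> bool:
--     id_str = str(product_id)
--     for divisor in range(2, len(id_str) + 1):
--         if len(id_str) % divisor != 0:
--             continue
--         if is_repeated_sequence(id_str, divisor):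
--             return True
--     return False
-- ===== SOURCE B (Python) =====
-- def is_invalid_id(product_id: int) -> bool:
--     s = str(product_id)
--     n = len(s)
--     return any(n % k == 0 and s[k:] == s[:n - k] for k in range(1, n))
-- ===== Notes on version B (the rewrite author's own statement) =====
-- stated objective: simpler
-- what changed: A enumerates repetition counts d and compares every block of size n/d to the prefix in an inner loop; B instead checks each candidate period k with a single shift-overlap comparison s[k:] == s[:n-k], with no inner block loop and no helper.
import Mathlib
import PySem

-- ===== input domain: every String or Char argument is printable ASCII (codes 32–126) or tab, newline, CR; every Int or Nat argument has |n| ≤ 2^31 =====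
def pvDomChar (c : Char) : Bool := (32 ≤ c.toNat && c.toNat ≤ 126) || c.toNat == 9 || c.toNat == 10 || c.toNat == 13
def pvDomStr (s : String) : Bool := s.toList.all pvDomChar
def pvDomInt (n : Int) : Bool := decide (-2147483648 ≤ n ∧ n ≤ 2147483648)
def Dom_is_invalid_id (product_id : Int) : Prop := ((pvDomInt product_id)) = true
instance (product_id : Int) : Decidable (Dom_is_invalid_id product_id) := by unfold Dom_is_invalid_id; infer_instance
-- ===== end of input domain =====

-- B replaces A's per-divisor enumeration of repetition counts with per-block equality checks by a
-- single shift-overlap comparison s[k:] == s[:n-k] for each candidate period k (objective: simpler).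

-- ===== PORT A =====
def is_repeated_sequence (product_id : List Char) (num_occurrances : Int) : Bool :=
  let sequence_size := PySem.Int.floordiv (product_id.length : Int) num_occurrances
  let sequence := PySem.List.slice product_id none (some sequence_size)
  (PySem.List.pyRange 1 num_occurrances 1).all fun i =>
    sequence == PySem.List.slice product_id (some (sequence_size * i)) (some (sequence_size * (i + 1)))

def is_invalid_id (product_id : Int) : Bool :=
  let id_str := PySem.Int.toChars product_id
  (PySem.List.pyRange 2 ((id_str.length : Int) + 1) 1).any fun divisor =>
    (PySem.Int.mod (id_str.length : Int) divisor == 0) && is_repeated_sequence id_str divisor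

-- ===== PORT B =====
def is_invalid_id_alt (product_id : Int) : Bool :=
  let s := PySem.Int.toChars product_id
  let n : Int := (s.length : Int)
  (PySem.List.pyRange 1 n 1).any fun k =>
    (PySem.Int.mod n k == 0) &&
      (PySem.List.slice s (some k) none == PySem.List.slice s none (some (n - k)))

-- ===== PRECONDITION & SPEC =====
def Spec_is_invalid_id (product_id : Int) (out : Bool) : Prop := out = is_invalid_id_alt product_id
instance (product_id : Int) (out : Bool) : Decidable (Spec_is_invalid_id product_id out) := by unfold Spec_is_invalid_id; infer_instance

-- ===== CLAIM (what is proved, stated in full; the proofs are below) =====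
def Claim_equal_is_invalid_id : Prop := ∀ (product_id : Int), Dom_is_invalid_id product_id → Spec_is_invalid_id product_id (is_invalid_id product_id)

-- ===== LEMMAS AND PROOFS =====

/-- `l` has period `k` (pointwise, on `getElem?`). -/
def periodP (l : List Char) (k : Nat) : Prop :=
  ∀ j : Nat, j + k < l.length → l[j + k]? = l[j]?

lemma drop_eq_take_iff (l : List Char) (k : Nat) :
    l.drop k = l.take (l.length - k) ↔ periodP l k := by
  constructor
  · intro h j hj
    have h1 : (l.drop k)[j]? = l[k + j]? := List.getElem?_drop
    rw [h, List.getElem?_take_of_lt (show j < l.length - k by omega)] at h1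
    rw [Nat.add_comm j k]
    exact h1.symm
  · intro h
    apply List.ext_getElem?
    intro j
    rw [List.getElem?_drop]
    by_cases hj : j < l.length - k
    · rw [List.getElem?_take_of_lt hj, Nat.add_comm k j]
      exact h j (by omega)
    · rw [List.getElem?_eq_none (by omega),
          List.getElem?_eq_none (by simp only [List.length_take]; omega)]

lemma period_aux (l : List Char) (k : Nat) (h : periodP l k) :
    ∀ (i j : Nat), k * i + j < l.length → l[k * i + j]? = l[j]? := by
  intro i
  induction i with
  | zero => intro j hj; simp
  | succ i ih =>
    intro j hj
    have e : k * (i + 1) + j = (k * i + j) + k := by ring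
    have e2 : k * i + j ≤ k * (i + 1) + j := by nlinarith
    rw [e, h (k * i + j) (by omega), ih j (by omega)]

lemma blocks_iff_period (l : List Char) (d k : Nat) (hd : 2 ≤ d) (hk : 1 ≤ k)
    (hn : k * d = l.length) :
    is_repeated_sequence l (d : Int) = true ↔ periodP l k := by
  have hfd : PySem.Int.floordiv (l.length : Int) (d : Int) = (k : Int) := by
    rw [← hn]
    rw [PySem.Int.floordiv_natCast]
    norm_num [Nat.mul_div_cancel _ (by omega : 0 < d)]
  unfold is_repeated_sequence
  simp only [hfd, List.all_eq_true, PySem.List.mem_pyRange_one, beq_iff_eq]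
  constructor
  · -- blocks → period
    intro hb j hj
    have hblock : ∀ (q r : Nat), 1 ≤ q → q < d → r < k → l[k * q + r]? = l[r]? := by
      intro q r hq1 hq2 hr
      have := hb (q : Int) ⟨by exact_mod_cast hq1, by exact_mod_cast hq2⟩
      rw [show ((k : Int) * (q : Int)) = ((k * q : Nat) : Int) by push_cast; ring,
          show ((k : Int) * ((q : Nat) + 1)) = ((k * q + k : Nat) : Int) by push_cast; ring] at this
      rw [PySem.List.slice_natCast, PySem.List.slice_to_natCast] at this
      have e : k * q + k - k * q = k := by omega
      rw [e] at this
      have h1 : (l.take k)[r]? = ((l.drop (k * q)).take k)[r]? := by rw [this]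
      rw [List.getElem?_take_of_lt hr, List.getElem?_take_of_lt hr, List.getElem?_drop] at h1
      exact h1.symm
    have hdm : k * (j / k) + j % k = j := Nat.div_add_mod j k
    have hrk : j % k < k := Nat.mod_lt _ (by omega)
    have hsucc : k * (j / k + 1) = k * (j / k) + k := Nat.mul_succ k (j / k)
    have hqd : j / k + 1 < d := by
      by_contra hc
      have hc' : d ≤ j / k + 1 := Nat.le_of_not_lt hc
      have h3 : k * (d - 1) ≤ k * (j / k) := Nat.mul_le_mul_left k (by omega)
      have h4 : k * (d - 1) + k = k * d := by
        have h5 : d - 1 + 1 = d := by omega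
        rw [← Nat.mul_succ, Nat.succ_eq_add_one, h5]
      omega
    have h1 : l[j]? = l[j % k]? := by
      rcases Nat.eq_zero_or_pos (j / k) with hq0 | hq0
      · rw [hq0, Nat.mul_zero, Nat.zero_add] at hdm
        rw [hdm]
      · have hb1 := hblock (j / k) (j % k) hq0 (by omega) hrk
        rw [hdm] at hb1
        exact hb1
    have h2 : l[j + k]? = l[j % k]? := by
      have e : j + k = k * (j / k + 1) + j % k := by
        rw [hsucc]
        omega
      have hb2 := hblock (j / k + 1) (j % k) (Nat.le_add_left 1 (j / k)) hqd hrk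
      rw [← e] at hb2
      exact hb2
    rw [h1, h2]
  · -- period → blocks
    intro hp i hi
    obtain ⟨hi1, hi2⟩ := hi
    obtain ⟨i', rfl⟩ : ∃ i' : Nat, i = (i' : Int) := ⟨i.toNat, (Int.toNat_of_nonneg (by omega)).symm⟩
    have hi1' : 1 ≤ i' := by exact_mod_cast hi1
    have hi2' : i' < d := by exact_mod_cast hi2
    rw [show ((k : Int) * (i' : Int)) = ((k * i' : Nat) : Int) by push_cast; ring,
        show ((k : Int) * ((i' : Nat) + 1)) = ((k * i' + k : Nat) : Int) by push_cast; ring,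
        PySem.List.slice_natCast, PySem.List.slice_to_natCast]
    have e : k * i' + k - k * i' = k := by omega
    rw [e]
    apply List.ext_getElem?
    intro j
    by_cases hj : j < k
    · rw [List.getElem?_take_of_lt hj, List.getElem?_take_of_lt hj, List.getElem?_drop]
      exact (period_aux l k hp i' j (by nlinarith)).symm
    · rw [List.getElem?_eq_none (by simp only [List.length_take]; omega),
          List.getElem?_eq_none (by simp only [List.length_take, List.length_drop]; omega)]

lemma loops_eq (l : List Char) :
    ((PySem.List.pyRange 2 ((l.length : Int) + 1) 1).any fun divisor =>
      (PySem.Int.mod (l.length : Int) divisor == 0) && is_repeated_sequence l divisor)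
    = ((PySem.List.pyRange 1 (l.length : Int) 1).any fun k =>
      (PySem.Int.mod (l.length : Int) k == 0) &&
        (PySem.List.slice l (some k) none == PySem.List.slice l none (some ((l.length : Int) - k)))) := by
  rw [Bool.eq_iff_iff]
  simp only [List.any_eq_true, PySem.List.mem_pyRange_one, Bool.and_eq_true, beq_iff_eq,
    PySem.Int.mod_eq_zero_iff_dvd]
  constructor
  · rintro ⟨d, ⟨hd1, hd2⟩, hdvd, hblocks⟩
    obtain ⟨D, rfl⟩ : ∃ D : Nat, d = (D : Int) := ⟨d.toNat, (Int.toNat_of_nonneg (by omega)).symm⟩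
    have hD1 : 2 ≤ D := by exact_mod_cast hd1
    have hDdvd : D ∣ l.length := by exact_mod_cast hdvd
    obtain ⟨K, hKD⟩ := hDdvd
    have hK1 : 1 ≤ K := by
      rcases Nat.eq_zero_or_pos K with h0 | h
      · rw [h0, Nat.mul_zero] at hKD
        have : ((l.length : Int)) = 0 := by exact_mod_cast hKD
        omega
      · omega
    have hKn : K < l.length := by nlinarith
    refine ⟨(K : Int), ⟨by exact_mod_cast hK1, by exact_mod_cast hKn⟩, ?_, ?_⟩
    · have : (K : Nat) ∣ l.length := ⟨D, by rw [hKD]; ring⟩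
      exact_mod_cast this
    · have hp : periodP l K := (blocks_iff_period l D K hD1 hK1 (by rw [hKD]; ring)).mp hblocks
      have hdt := (drop_eq_take_iff l K).mpr hp
      rw [PySem.List.slice_from_natCast,
          show ((l.length : Int) - (K : Int)) = ((l.length - K : Nat) : Int) by omega,
          PySem.List.slice_to_natCast]
      exact hdt
  · rintro ⟨k, ⟨hk1, hk2⟩, hdvd, hshift⟩
    obtain ⟨K, rfl⟩ : ∃ K : Nat, k = (K : Int) := ⟨k.toNat, (Int.toNat_of_nonneg (by omega)).symm⟩
    have hK1 : 1 ≤ K := by exact_mod_cast hk1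
    have hK2 : K < l.length := by exact_mod_cast hk2
    have hKdvd : K ∣ l.length := by exact_mod_cast hdvd
    obtain ⟨D, hKD⟩ := hKdvd
    have hD2 : 2 ≤ D := by
      rcases Nat.lt_or_ge D 2 with h | h
      · interval_cases D
        · rw [Nat.mul_zero] at hKD; omega
        · rw [Nat.mul_one] at hKD; omega
      · exact h
    refine ⟨(D : Int), ⟨by exact_mod_cast hD2, ?_⟩, ?_, ?_⟩
    · have hDn : D ≤ l.length := by nlinarith
      have hDc : (D : Int) ≤ (l.length : Int) := by exact_mod_cast hDn
      omega
    · exact_mod_cast (⟨K, by rw [hKD]; ring⟩ : (D : Nat) ∣ l.length)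
    · apply (blocks_iff_period l D K hD2 hK1 hKD.symm).mpr
      apply (drop_eq_take_iff l K).mp
      rw [PySem.List.slice_from_natCast,
          show ((l.length : Int) - (K : Int)) = ((l.length - K : Nat) : Int) by omega,
          PySem.List.slice_to_natCast] at hshift
      exact hshift

-- ===== VERDICT (by name: the statement is the Claim_ definition above) =====
theorem is_invalid_id_spec : Claim_equal_is_invalid_id := by
  intro p _
  unfold Spec_is_invalid_id is_invalid_id is_invalid_id_alt
  exact loops_eq (PySem.Int.toChars p)
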